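-- pv_equiv track=rewrite | github.com/woodstock1993/CodingTest | monitorLab/m3.py | solution
-- ===== SOURCE A (Python) =====
-- def solution(n, m, x_axis, y_axis):
--     x_axis.insert(0, 0)
--     x_axis.append(n)
--     y_axis.insert(0, 0)
--     y_axis.append(m)
--
--     x_axis.sort()
--     y_axis.sort()
--
--     s = []
--
--     for i in range(len(x_axis) - 1):
--         width = x_axis[i + 1] - x_axis[i]
--         for j in range(len(y_axis) - 1):
--             height = y_axis[j + 1] - y_axis[j]
--             s.append(width * height)
--
--     answer = max(s)
--
--     return answer
-- ===== SOURCE B (Python) =====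
-- def solution(n, m, x_axis, y_axis):
--     def max_gap(bound, cuts):
--         pts = sorted([0] + cuts + [bound])
--         return max(b - a for a, b in zip(pts, pts[1:]))
--     return max_gap(n, x_axis) * max_gap(m, y_axis)
-- ===== Notes on version B (the rewrite author's own statement) =====
-- stated objective: faster
-- what changed: B computes the maximum adjacent gap of each axis separately (sort + one linear scan per axis) and multiplies them, instead of materialising the full X*Y list of candidate rectangle areas and taking its max.
import Mathlib
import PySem

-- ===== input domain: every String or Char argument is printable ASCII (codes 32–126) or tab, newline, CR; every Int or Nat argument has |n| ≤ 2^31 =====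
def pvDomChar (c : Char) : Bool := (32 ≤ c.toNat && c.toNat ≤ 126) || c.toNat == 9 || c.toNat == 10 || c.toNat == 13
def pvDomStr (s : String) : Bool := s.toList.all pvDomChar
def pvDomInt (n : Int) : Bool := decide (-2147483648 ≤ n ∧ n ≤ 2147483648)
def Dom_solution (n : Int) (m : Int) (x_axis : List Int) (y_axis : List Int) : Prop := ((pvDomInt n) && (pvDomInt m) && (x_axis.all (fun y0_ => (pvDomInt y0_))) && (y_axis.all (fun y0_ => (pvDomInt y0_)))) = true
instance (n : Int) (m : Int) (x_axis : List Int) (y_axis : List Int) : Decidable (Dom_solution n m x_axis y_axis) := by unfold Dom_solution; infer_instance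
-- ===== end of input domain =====

-- B computes the maximum adjacent gap per axis and multiplies (sort + linear scan),
-- instead of A's full X*Y cross product of areas; equivalence is about the RETURN value only
-- (the Python A mutates x_axis/y_axis in place, B does not).

-- ===== PORT A =====
def solution (n : Int) (m : Int) (x_axis : List Int) (y_axis : List Int) : Int :=
  let xa := PySem.List.sorted ((0 :: x_axis) ++ [n]) (fun v => v) false
  let ya := PySem.List.sorted ((0 :: y_axis) ++ [m]) (fun v => v) false
  let s := (PySem.List.pyRange 0 ((xa.length : Int) - 1) 1).foldl (fun s i =>
      let width := PySem.List.pyGetD xa (i + 1) 0 - PySem.List.pyGetD xa i 0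
      (PySem.List.pyRange 0 ((ya.length : Int) - 1) 1).foldl (fun s j =>
        let height := PySem.List.pyGetD ya (j + 1) 0 - PySem.List.pyGetD ya j 0
        s ++ [width * height]) s) []
  match PySem.List.max? s (fun v => v) with
  | some a => a
  | none => 0  -- unreachable: both axes have ≥ 2 points, so s is nonempty (Python's max(s) never raises)

-- ===== PORT B =====
def maxGapB (bound : Int) (cuts : List Int) : Int :=
  let pts := PySem.List.sorted ((0 :: cuts) ++ [bound]) (fun v => v) false
  match PySem.List.max? ((pts.zip (pts.drop 1)).map (fun p => p.2 - p.1)) (fun v => v) with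
  | some a => a
  | none => 0  -- unreachable: pts has ≥ 2 elements (Python's max(...) never raises)

def solution_alt (n : Int) (m : Int) (x_axis : List Int) (y_axis : List Int) : Int :=
  maxGapB n x_axis * maxGapB m y_axis

-- ===== PRECONDITION & SPEC =====
def Spec_solution (n : Int) (m : Int) (x_axis : List Int) (y_axis : List Int) (out : Int) : Prop := out = solution_alt n m x_axis y_axis
instance (n : Int) (m : Int) (x_axis : List Int) (y_axis : List Int) (out : Int) : Decidable (Spec_solution n m x_axis y_axis out) := by unfold Spec_solution; infer_instance

-- ===== CLAIM (what is proved, stated in full; the proofs are below) =====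
def Claim_equal_solution : Prop := ∀ (n : Int) (m : Int) (x_axis : List Int) (y_axis : List Int), Dom_solution n m x_axis y_axis → Spec_solution n m x_axis y_axis (solution n m x_axis y_axis)

-- ===== LEMMAS AND PROOFS =====

-- adjacent-gap list of a list
def gapsOf (l : List Int) : List Int := (l.zip (l.drop 1)).map (fun p => p.2 - p.1)

theorem gapsOf_length (l : List Int) : (gapsOf l).length = l.length - 1 := by
  simp [gapsOf]

-- the index-based width list of port A equals gapsOf
theorem range_getD_eq_gapsOf (l : List Int) :
    (List.range (l.length - 1)).map (fun i => l.getD (i + 1) 0 - l.getD i 0) = gapsOf l := by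
  induction l with
  | nil => simp [gapsOf]
  | cons a t ih =>
    cases t with
    | nil => simp [gapsOf]
    | cons b t2 =>
      have h : (a :: b :: t2).length - 1 = ((b :: t2).length - 1) + 1 := by simp
      rw [h, List.range_succ_eq_map]
      simp only [List.map_cons, List.map_map]
      have h2 : ((List.range ((b :: t2).length - 1)).map
          ((fun i => (a :: b :: t2).getD (i + 1) 0 - (a :: b :: t2).getD i 0) ∘ Nat.succ))
          = (List.range ((b :: t2).length - 1)).map
            (fun i => (b :: t2).getD (i + 1) 0 - (b :: t2).getD i 0) := by
        apply List.map_congr_left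
        intro i _
        simp [List.getD]
      rw [h2, ih]
      simp [gapsOf]

-- port A's pyGetD-indexed gap map over pyRange equals gapsOf
theorem pyGetD_map_gaps (l : List Int) :
    (PySem.List.pyRange 0 ((l.length : Int) - 1) 1).map
      (fun j => PySem.List.pyGetD l (j + 1) 0 - PySem.List.pyGetD l j 0) = gapsOf l := by
  rw [PySem.List.pyRange_one, List.map_map]
  have h : ((l.length : Int) - 1 - 0).toNat = l.length - 1 := by omega
  rw [h, ← range_getD_eq_gapsOf]
  apply List.map_congr_left
  intro k _
  simp only [Function.comp]
  rw [show (0 + (k : Int) + 1) = ((k + 1 : Nat) : Int) by push_cast; ring,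
      show (0 + (k : Int)) = ((k : Nat) : Int) by ring]
  rw [PySem.List.pyGetD_natCast, PySem.List.pyGetD_natCast]

-- extraction of the value of Python's max on a characterized maximum
theorem max_match_eq (xs : List Int) (m : Int) (hm : m ∈ xs) (hmax : ∀ y ∈ xs, y ≤ m) :
    (match PySem.List.max? xs (fun v => v) with | some a => a | none => 0) = m := by
  cases h : PySem.List.max? xs (fun v => v) with
  | none =>
    rw [PySem.List.max?_eq_none_iff] at h
    subst h; simp at hm
  | some a =>
    have ha : m ≤ a := PySem.List.max?_isMax h m hm
    have hb : a ≤ m := hmax a (PySem.List.max?_mem h)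
    show a = m
    omega

-- Python's max of a nonempty list is a member and an upper bound
theorem matchMax_spec (xs : List Int) (hne : xs ≠ []) :
    (match PySem.List.max? xs (fun v => v) with | some a => a | none => 0) ∈ xs ∧
    ∀ y ∈ xs, y ≤ (match PySem.List.max? xs (fun v => v) with | some a => a | none => 0) := by
  cases h : PySem.List.max? xs (fun v => v) with
  | none => exact absurd ((PySem.List.max?_eq_none_iff xs _).mp h) hne
  | some a =>
    exact ⟨PySem.List.max?_mem h, fun y hy => PySem.List.max?_isMax h y hy⟩

-- adjacent pairs of a pairwise-ordered list are ordered
theorem pairwise_zip_drop (l : List Int) (h : l.Pairwise (· ≤ ·)) :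
    ∀ p ∈ l.zip (l.drop 1), p.1 ≤ p.2 := by
  induction l with
  | nil => simp
  | cons a t ih =>
    cases t with
    | nil => simp
    | cons b t2 =>
      intro p hp
      simp only [List.drop_one, List.tail_cons, List.zip_cons_cons, List.mem_cons] at hp
      rcases hp with h1 | h2
      · subst h1; exact (List.pairwise_cons.mp h).1 b (by simp)
      · exact ih (List.pairwise_cons.mp h).2 p (by simpa [List.drop_one] using h2)

-- gaps of a sorted list are nonnegative
theorem gapsOf_sorted_nonneg (xs : List Int) :
    ∀ g ∈ gapsOf (PySem.List.sorted xs (fun v => v) false), 0 ≤ g := by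
  intro g hg
  simp only [gapsOf, List.mem_map] at hg
  obtain ⟨p, hp, rfl⟩ := hg
  have := pairwise_zip_drop _ (PySem.List.sorted_pairwise xs (fun v => v)) p hp
  omega

-- the gap list of the augmented sorted axis is nonempty
theorem gapsOf_sorted_ne_nil (bound : Int) (cuts : List Int) :
    gapsOf (PySem.List.sorted ((0 :: cuts) ++ [bound]) (fun v => v) false) ≠ [] := by
  intro h
  have hl := congrArg List.length h
  rw [gapsOf_length, PySem.List.length_sorted] at hl
  simp at hl

-- the per-axis value of B is the maximum element of the gap list
theorem maxGapB_spec (bound : Int) (cuts : List Int) :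
    maxGapB bound cuts ∈ gapsOf (PySem.List.sorted ((0 :: cuts) ++ [bound]) (fun v => v) false) ∧
    ∀ g ∈ gapsOf (PySem.List.sorted ((0 :: cuts) ++ [bound]) (fun v => v) false),
      g ≤ maxGapB bound cuts := by
  exact matchMax_spec _ (gapsOf_sorted_ne_nil bound cuts)

-- A's accumulated list s is the cross product of the two gap lists
theorem s_eq_flatMap (xa ya : List Int) :
    (PySem.List.pyRange 0 ((xa.length : Int) - 1) 1).foldl (fun s i =>
      let width := PySem.List.pyGetD xa (i + 1) 0 - PySem.List.pyGetD xa i 0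
      (PySem.List.pyRange 0 ((ya.length : Int) - 1) 1).foldl (fun s j =>
        let height := PySem.List.pyGetD ya (j + 1) 0 - PySem.List.pyGetD ya j 0
        s ++ [width * height]) s) []
    = (gapsOf xa).flatMap (fun w => (gapsOf ya).map (fun h => w * h)) := by
  have hinner : ∀ (w : Int) (acc : List Int),
      (PySem.List.pyRange 0 ((ya.length : Int) - 1) 1).foldl (fun s j =>
        s ++ [w * (PySem.List.pyGetD ya (j + 1) 0 - PySem.List.pyGetD ya j 0)]) acc
      = acc ++ (gapsOf ya).map (fun h => w * h) := by
    intro w acc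
    rw [PySem.List.foldl_append_singleton_eq_map]
    congr 1
    rw [show (fun j => w * (PySem.List.pyGetD ya (j + 1) 0 - PySem.List.pyGetD ya j 0))
        = ((fun v => w * v) ∘ (fun j => PySem.List.pyGetD ya (j + 1) 0 - PySem.List.pyGetD ya j 0))
        from rfl,
      ← List.map_map, pyGetD_map_gaps]
  calc (PySem.List.pyRange 0 ((xa.length : Int) - 1) 1).foldl (fun s i =>
        let width := PySem.List.pyGetD xa (i + 1) 0 - PySem.List.pyGetD xa i 0
        (PySem.List.pyRange 0 ((ya.length : Int) - 1) 1).foldl (fun s j =>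
          let height := PySem.List.pyGetD ya (j + 1) 0 - PySem.List.pyGetD ya j 0
          s ++ [width * height]) s) []
      = (PySem.List.pyRange 0 ((xa.length : Int) - 1) 1).foldl (fun s i =>
          s ++ ((gapsOf ya).map (fun h =>
            (PySem.List.pyGetD xa (i + 1) 0 - PySem.List.pyGetD xa i 0) * h))) [] := by
        apply PySem.List.foldl_congr_mem
        intro acc x _
        exact hinner (PySem.List.pyGetD xa (x + 1) 0 - PySem.List.pyGetD xa x 0) acc
    _ = ((PySem.List.pyRange 0 ((xa.length : Int) - 1) 1).map
          (fun i => PySem.List.pyGetD xa (i + 1) 0 - PySem.List.pyGetD xa i 0)).flatMap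
          (fun w => (gapsOf ya).map (fun h => w * h)) := by
        rw [PySem.List.foldl_append_eq_flatMap, List.flatMap_map]
        simp
    _ = (gapsOf xa).flatMap (fun w => (gapsOf ya).map (fun h => w * h)) := by
        rw [pyGetD_map_gaps]

-- ===== VERDICT (by name: the statement is the Claim_ definition above) =====
theorem solution_spec : Claim_equal_solution := by
  intro n m x_axis y_axis _
  unfold Spec_solution solution solution_alt
  simp only []
  rw [s_eq_flatMap]
  obtain ⟨hxmem, hxmax⟩ := maxGapB_spec n x_axis
  obtain ⟨hymem, hymax⟩ := maxGapB_spec m y_axis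
  apply max_match_eq
  · exact List.mem_flatMap.mpr ⟨maxGapB n x_axis, hxmem,
      List.mem_map.mpr ⟨maxGapB m y_axis, hymem, rfl⟩⟩
  · intro y hy
    obtain ⟨w, hw, hy2⟩ := List.mem_flatMap.mp hy
    obtain ⟨h, hh, rfl⟩ := List.mem_map.mp hy2
    have h0h : 0 ≤ h := gapsOf_sorted_nonneg _ h hh
    have h0mx : 0 ≤ maxGapB n x_axis := le_trans (gapsOf_sorted_nonneg _ w hw) (hxmax w hw)
    calc w * h ≤ maxGapB n x_axis * h := mul_le_mul_of_nonneg_right (hxmax w hw) h0h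
      _ ≤ maxGapB n x_axis * maxGapB m y_axis := mul_le_mul_of_nonneg_left (hymax h hh) h0mx
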